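-- pv_equiv track=rewrite | github.com/ddu0422/study | algorithm/baekjoon/greedy/silver1/16206.py | solution
-- ===== SOURCE A (Python) =====
-- def solution(m, cakes):
--     answer = 0
--
--     # 10의 배수인 경우 몫 - 1회 만큼 자르기
--     for value in sorted(list(filter(lambda x: not x % 10, cakes))):
--         if m - (value // 10 - 1) >= 0:
--             m -= (value // 10 - 1) # 30을 2회 자라서
--             answer += value // 10  # 10을 3개를 만들 수 있다.
--         else:
--             answer += m            # 전부 자를 수 없는 경우 남은 횟수만큼 10을 만들 수 있다.
--             m = 0
--             break
--
--     # 10의 배수가 아닌 경우 몫만큼 자르기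
--     for value in sorted(list(filter(lambda x: x % 10, cakes))):
--         if m - (value // 10) >= 0:
--             m -= (value // 10)
--             answer += (value // 10)
--         else:
--             answer += m
--             break
--
--     return answer
-- ===== SOURCE B (Python) =====
-- def solution(m, cakes):
--     # Declarative reformulation: no running budget, no break. Each phase builds
--     # cut-cost prefix sums over its sorted values, locates the first position
--     # whose cumulative cost exceeds the budget, and returns (gain, leftover)
--     # as closed-form slice sums (leftover 0 when the budget runs out).
--     def phase(budget, values):
--         pieces = [x // 10 for x in values]
--         prefix = [0]
--         for x in values:
--             prefix.append(prefix[-1] + (x // 10 - (x % 10 == 0)))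
--         j = next((i for i in range(len(values)) if prefix[i + 1] > budget), None)
--         if j is None:
--             return sum(pieces), budget - prefix[len(values)]
--         return sum(pieces[:j]) + (budget - prefix[j]), 0
--
--     gain1, left = phase(m, sorted(x for x in cakes if x % 10 == 0))
--     gain2, _ = phase(left, sorted(x for x in cakes if x % 10 != 0))
--     return gain1 + gain2
-- ===== Notes on version B (the rewrite author's own statement) =====
-- stated objective: alternative
-- what changed: Replaces A's stateful greedy (running budget mutated in two loops with an early break) with a declarative formulation: each phase builds cut-cost prefix sums over its sorted values, locates the first position whose cumulative cost exceeds the budget, and reads gain and leftover budget off as closed-form slice sums.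
import Mathlib
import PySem

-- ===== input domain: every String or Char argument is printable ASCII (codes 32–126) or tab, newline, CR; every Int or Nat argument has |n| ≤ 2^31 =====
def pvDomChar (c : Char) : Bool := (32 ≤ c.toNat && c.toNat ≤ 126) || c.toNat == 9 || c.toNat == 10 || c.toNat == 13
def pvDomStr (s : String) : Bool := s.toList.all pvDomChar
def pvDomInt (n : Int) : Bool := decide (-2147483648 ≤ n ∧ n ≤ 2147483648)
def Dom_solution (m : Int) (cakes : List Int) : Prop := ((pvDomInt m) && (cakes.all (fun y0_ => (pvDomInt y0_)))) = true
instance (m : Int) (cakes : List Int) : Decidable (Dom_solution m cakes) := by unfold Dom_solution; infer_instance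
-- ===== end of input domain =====

-- B replaces A's stateful greedy (running budget, break) with a declarative
-- prefix-sum formulation per phase: cutoff index + closed-form slice sums. Same cost class.

-- ===== PORT A =====
-- first for-loop of A (over the sorted multiples of 10); returns (m, answer) after the loop
def loopA1 : Int → Int → List Int → Int × Int
  | m, answer, [] => (m, answer)
  | m, answer, value :: rest =>
    if m - (PySem.Int.floordiv value 10 - 1) ≥ 0 then
      loopA1 (m - (PySem.Int.floordiv value 10 - 1)) (answer + PySem.Int.floordiv value 10) rest
    else
      (0, answer + m)

-- second for-loop of A (over the sorted non-multiples of 10); returns answer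
def loopA2 : Int → Int → List Int → Int
  | _m, answer, [] => answer
  | m, answer, value :: rest =>
    if m - PySem.Int.floordiv value 10 ≥ 0 then
      loopA2 (m - PySem.Int.floordiv value 10) (answer + PySem.Int.floordiv value 10) rest
    else
      answer + m

def solution (m : Int) (cakes : List Int) : Int :=
  let p := loopA1 m 0 (PySem.List.sorted (cakes.filter (fun x => PySem.Int.mod x 10 == 0)) (fun x => x) false)
  loopA2 p.1 p.2 (PySem.List.sorted (cakes.filter (fun x => PySem.Int.mod x 10 != 0)) (fun x => x) false)

-- ===== PORT B =====
-- prefix.append(prefix[-1] + (x // 10 - (x % 10 == 0)))  — one fold step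
def pvStep (pre : List Int) (x : Int) : List Int :=
  pre ++ [PySem.List.pyGetD pre (-1) 0 + (PySem.Int.floordiv x 10 - (if PySem.Int.mod x 10 == 0 then 1 else 0))]

-- next((i for i in range(len(values)) if prefix[i+1] > budget), None)
def pvFindCut (pre : List Int) (m : Int) : List Int → Option Int
  | [] => none
  | i :: rest => if PySem.List.pyGetD pre (i + 1) 0 > m then some i else pvFindCut pre m rest

-- B's phase(budget, values): (gain, leftover budget)
def pvPhase (budget : Int) (values : List Int) : Int × Int :=
  let pieces := values.map (fun x => PySem.Int.floordiv x 10)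
  let pre := List.foldl pvStep [0] values
  match pvFindCut pre budget (PySem.List.pyRange 0 (values.length : Int) 1) with
  | none => (pieces.foldl (· + ·) 0, budget - PySem.List.pyGetD pre (values.length : Int) 0)
  | some j => ((PySem.List.slice pieces none (some j)).foldl (· + ·) 0 + (budget - PySem.List.pyGetD pre j 0), 0)

def solution_alt (m : Int) (cakes : List Int) : Int :=
  let p1 := pvPhase m (PySem.List.sorted (cakes.filter (fun x => PySem.Int.mod x 10 == 0)) (fun x => x) false)
  let p2 := pvPhase p1.2 (PySem.List.sorted (cakes.filter (fun x => PySem.Int.mod x 10 != 0)) (fun x => x) false)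
  p1.1 + p2.1

-- ===== PRECONDITION & SPEC =====
def Spec_solution (m : Int) (cakes : List Int) (out : Int) : Prop := out = solution_alt m cakes
instance (m : Int) (cakes : List Int) (out : Int) : Decidable (Spec_solution m cakes out) := by
  unfold Spec_solution; infer_instance

-- ===== CLAIM (what is proved, stated in full; the proofs are below) =====
def Claim_equal_solution : Prop := ∀ (m : Int) (cakes : List Int), Dom_solution m cakes → Spec_solution m cakes (solution m cakes)

-- ===== LEMMAS AND PROOFS =====

-- the cut cost of one cake, and the shared mathematical spec of one greedy phase:
-- pvSP budget values = (gain, leftover budget; 0 when the budget runs out)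
def pvCost (x : Int) : Int := PySem.Int.floordiv x 10 - (if PySem.Int.mod x 10 == 0 then 1 else 0)

def pvSP : Int → List Int → Int × Int
  | m, [] => (0, m)
  | m, v :: t =>
    if m - pvCost v ≥ 0 then
      (PySem.Int.floordiv v 10 + (pvSP (m - pvCost v) t).1, (pvSP (m - pvCost v) t).2)
    else (m, 0)

-- ---- A side: each of A's loops computes pvSP on its (filtered) list ----

theorem pv_loopA1_eq_pvSP : ∀ (l : List Int) (m a : Int),
    (∀ v ∈ l, (PySem.Int.mod v 10 == 0) = true) →
    loopA1 m a l = ((pvSP m l).2, a + (pvSP m l).1) := by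
  intro l
  induction l with
  | nil => intro m a _; simp [loopA1, pvSP]
  | cons v t ih =>
    intro m a hl
    have hv : (PySem.Int.mod v 10 == 0) = true := hl v (by simp)
    have hc : pvCost v = PySem.Int.floordiv v 10 - 1 := by
      unfold pvCost
      rw [if_pos hv]
    by_cases h : m - (PySem.Int.floordiv v 10 - 1) ≥ 0
    · simp only [loopA1, pvSP, hc, if_pos h]
      rw [ih _ _ (fun z hz => hl z (by simp [hz]))]
      simp only [Prod.mk.injEq, true_and]
      ring
    · simp only [loopA1, pvSP, hc, if_neg h]

theorem pv_loopA2_eq_pvSP : ∀ (l : List Int) (m a : Int),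
    (∀ v ∈ l, (PySem.Int.mod v 10 == 0) = false) →
    loopA2 m a l = a + (pvSP m l).1 := by
  intro l
  induction l with
  | nil => intro m a _; simp [loopA2, pvSP]
  | cons v t ih =>
    intro m a hl
    have hv : (PySem.Int.mod v 10 == 0) = false := hl v (by simp)
    have hc : pvCost v = PySem.Int.floordiv v 10 := by
      unfold pvCost
      rw [if_neg (by rw [hv]; exact Bool.false_ne_true)]
      ring
    by_cases h : m - PySem.Int.floordiv v 10 ≥ 0
    · simp only [loopA2, pvSP, hc, if_pos h]
      rw [ih _ _ (fun z hz => hl z (by simp [hz]))]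
      ring
    · simp only [loopA2, pvSP, hc, if_neg h]

-- ---- B side: pvPhase computes pvSP on every list ----

theorem pv_foldl_add : ∀ (l : List Int) (a : Int), l.foldl (· + ·) a = a + l.foldl (· + ·) 0 := by
  intro l
  induction l with
  | nil => intro a; simp
  | cons x t ih =>
    intro a
    simp only [List.foldl_cons]
    rw [ih (a + x), ih (0 + x)]
    ring

theorem pv_foldl_pvStep_length : ∀ (t L : List Int), (List.foldl pvStep L t).length = L.length + t.length := by
  intro t
  induction t with
  | nil => intro L; simp
  | cons x t ih =>
    intro L
    simp only [List.foldl_cons]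
    rw [ih]
    simp [pvStep]
    omega

theorem pv_getD_neg_one_cons (z : Int) (L : List Int) (h : L ≠ []) :
    PySem.List.pyGetD (z :: L) (-1) 0 = PySem.List.pyGetD L (-1) 0 := by
  rw [PySem.List.pyGetD_neg_one (z :: L) 0 (by simp), PySem.List.pyGetD_neg_one L 0 h]
  exact List.getLast_cons h

theorem pv_foldl_pvStep_cons : ∀ (t : List Int) (z : Int) (L : List Int), L ≠ [] →
    List.foldl pvStep (z :: L) t = z :: List.foldl pvStep L t := by
  intro t
  induction t with
  | nil => intro z L _; rfl
  | cons x t ih =>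
    intro z L hL
    simp only [List.foldl_cons]
    have hs : pvStep (z :: L) x = z :: pvStep L x := by
      simp only [pvStep, pv_getD_neg_one_cons z L hL, List.cons_append]
    rw [hs]
    exact ih z (pvStep L x) (by simp [pvStep])

theorem pv_getLast_map (c : Int) (L : List Int) (h : L ≠ []) :
    PySem.List.pyGetD (L.map (c + ·)) (-1) 0 = c + PySem.List.pyGetD L (-1) 0 := by
  rw [PySem.List.pyGetD_neg_one (L.map (c + ·)) 0 (by simpa using h), PySem.List.pyGetD_neg_one L 0 h]
  exact List.getLast_map (f := (c + ·)) (by simpa using h)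

theorem pv_foldl_pvStep_map : ∀ (t : List Int) (c : Int) (L : List Int), L ≠ [] →
    List.foldl pvStep (L.map (c + ·)) t = (List.foldl pvStep L t).map (c + ·) := by
  intro t
  induction t with
  | nil => intro c L _; rfl
  | cons x t ih =>
    intro c L hL
    simp only [List.foldl_cons]
    have hs : pvStep (L.map (c + ·)) x = (pvStep L x).map (c + ·) := by
      simp only [pvStep, pv_getLast_map c L hL, List.map_append, List.map_cons, List.map_nil]
      congr 2
      ring
    rw [hs]
    exact ih c (pvStep L x) (by simp [pvStep])

theorem pv_prefix_cons (v : Int) (t : List Int) :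
    List.foldl pvStep [0] (v :: t) = 0 :: (List.foldl pvStep [0] t).map (pvCost v + ·) := by
  have h1 : pvStep [0] v = [0, pvCost v] := by
    have hg : PySem.List.pyGetD ([0] : List Int) (-1) 0 = 0 := by
      rw [PySem.List.pyGetD_neg_one ([0] : List Int) 0 (by simp)]; rfl
    simp only [pvStep, hg, pvCost, List.singleton_append, zero_add]
  have h2 : ([0, pvCost v] : List Int) = 0 :: ([0] : List Int).map (pvCost v + ·) := by
    simp
  simp only [List.foldl_cons, h1, h2]
  rw [pv_foldl_pvStep_cons t 0 _ (by simp), pv_foldl_pvStep_map t (pvCost v) [0] (by simp)]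

theorem pv_prefix_head : ∀ (l : List Int), (List.foldl pvStep [0] l).getD 0 0 = 0 := by
  intro l
  cases l with
  | nil => rfl
  | cons v t => rw [pv_prefix_cons]; rfl

theorem pv_findCut_mem : ∀ (idxs : List Int) (pre : List Int) (m j : Int),
    pvFindCut pre m idxs = some j → j ∈ idxs := by
  intro idxs
  induction idxs with
  | nil => intro pre m j h; simp [pvFindCut] at h
  | cons i rest ih =>
    intro pre m j h
    by_cases hc : PySem.List.pyGetD pre (i + 1) 0 > m
    · simp only [pvFindCut, if_pos hc, Option.some.injEq] at h
      simp [h]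
    · simp only [pvFindCut, if_neg hc] at h
      exact List.mem_cons_of_mem _ (ih pre m j h)

theorem pv_getD_shift (P : List Int) (c : Int) (i : Int) (h0 : 0 ≤ i) (hi : i < (P.length : Int)) :
    PySem.List.pyGetD (0 :: P.map (c + ·)) (i + 1) 0 = c + PySem.List.pyGetD P i 0 := by
  obtain ⟨j, rfl⟩ := Int.eq_ofNat_of_zero_le h0
  have hj : j < P.length := by exact_mod_cast hi
  have h1 : ((j : Int) + 1) = ((j + 1 : Nat) : Int) := by push_cast; ring
  rw [h1, PySem.List.pyGetD_natCast, PySem.List.pyGetD_natCast]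
  simp only [List.getD_cons_succ]
  rw [List.getD_eq_getElem _ _ (by simpa using hj), List.getD_eq_getElem _ _ hj]
  simp

theorem pv_findCut_shift (P : List Int) (c m : Int) : ∀ (idxs : List Int),
    (∀ i ∈ idxs, 0 ≤ i ∧ i + 1 < (P.length : Int)) →
    pvFindCut (0 :: P.map (c + ·)) m (idxs.map (· + 1)) = Option.map (· + 1) (pvFindCut P (m - c) idxs) := by
  intro idxs
  induction idxs with
  | nil => intro _; rfl
  | cons i rest ih =>
    intro h
    obtain ⟨h0, hi⟩ := h i (by simp)
    have hcond : PySem.List.pyGetD (0 :: P.map (c + ·)) (i + 1 + 1) 0 = c + PySem.List.pyGetD P (i + 1) 0 :=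
      pv_getD_shift P c (i + 1) (by omega) hi
    by_cases hc : PySem.List.pyGetD P (i + 1) 0 > m - c
    · simp only [List.map_cons, pvFindCut, hcond, if_pos (by omega : c + PySem.List.pyGetD P (i+1) 0 > m),
        if_pos hc, Option.map_some]
    · simp only [List.map_cons, pvFindCut, hcond, if_neg (by omega : ¬ c + PySem.List.pyGetD P (i+1) 0 > m),
        if_neg hc]
      exact ih (fun z hz => h z (by simp [hz]))

theorem pv_pyRange_shift (n : Nat) :
    PySem.List.pyRange 1 ((n : Int) + 1) 1 = (PySem.List.pyRange 0 (n : Int) 1).map (· + 1) := by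
  rw [PySem.List.pyRange_one, PySem.List.pyRange_one]
  simp only [List.map_map]
  have : ((n : Int) + 1 - 1).toNat = ((n : Int) - 0).toNat := by omega
  rw [this]
  apply List.map_congr_left
  intro k _
  simp
  ring

theorem pv_pvPhase_eq_pvSP : ∀ (l : List Int) (m : Int), pvPhase m l = pvSP m l := by
  intro l
  induction l with
  | nil =>
    intro m
    simp [pvPhase, pvSP, pvFindCut, PySem.List.pyRange_one_eq_nil (le_refl (0 : Int)),
      PySem.List.pyGetD_zero_cons]
  | cons v t ih =>
    intro m
    set P := List.foldl pvStep [0] t with hP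
    have hPlen : P.length = t.length + 1 := by
      rw [hP, pv_foldl_pvStep_length]; simp; omega
    set c := pvCost v with hc
    have hpre : List.foldl pvStep [0] (v :: t) = 0 :: P.map (c + ·) := pv_prefix_cons v t
    have hrange : PySem.List.pyRange 0 (((v :: t).length : Int)) 1
        = 0 :: (PySem.List.pyRange 0 (t.length : Int) 1).map (· + 1) := by
      rw [show (((v :: t).length : Int)) = (t.length : Int) + 1 by simp]
      rw [PySem.List.pyRange_one_cons (by positivity), show (0 : Int) + 1 = 1 by ring]
      exact congrArg _ (pv_pyRange_shift t.length)
    have hhead : PySem.List.pyGetD (0 :: P.map (c + ·)) (0 + 1) 0 = c := by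
      have := pv_getD_shift P c 0 le_rfl (by rw [hPlen]; positivity)
      rw [this, PySem.List.pyGetD_zero, pv_prefix_head t]
      ring
    by_cases hbr : c > m
    · -- cutoff at position 0: gain = m, leftover = 0
      have : pvPhase m (v :: t)
          = (0 + (m - PySem.List.pyGetD (0 :: P.map (c + ·)) 0 0), 0) := by
        unfold pvPhase
        rw [hpre, hrange]
        simp only [pvFindCut, hhead, if_pos hbr]
        rw [PySem.List.slice_to (hb := le_rfl)]
        simp
      rw [this, PySem.List.pyGetD_zero_cons]
      simp only [pvSP]
      rw [if_neg (by omega)]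
      simp
    · have hshift : pvFindCut (0 :: P.map (c + ·)) m ((PySem.List.pyRange 0 (t.length : Int) 1).map (· + 1))
          = Option.map (· + 1) (pvFindCut P (m - c) (PySem.List.pyRange 0 (t.length : Int) 1)) := by
        apply pv_findCut_shift
        intro i hi
        have := (PySem.List.mem_pyRange_one).mp hi
        constructor
        · exact this.1
        · rw [hPlen]; push_cast; omega
      have hS : pvSP m (v :: t)
          = (PySem.Int.floordiv v 10 + (pvSP (m - c) t).1, (pvSP (m - c) t).2) := by
        simp only [pvSP]
        rw [if_pos (by omega)]
      rw [hS, ← ih (m - c)]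
      unfold pvPhase
      rw [hpre, hrange]
      simp only [pvFindCut, hhead, if_neg hbr, hshift]
      cases hfc : pvFindCut P (m - c) (PySem.List.pyRange 0 (t.length : Int) 1) with
      | none =>
        simp only [Option.map_none]
        have hlast : PySem.List.pyGetD (0 :: P.map (c + ·)) (((v :: t).length : Int)) 0
            = c + PySem.List.pyGetD P ((t.length : Int)) 0 := by
          rw [show (((v :: t).length : Int)) = (t.length : Int) + 1 by simp]
          apply pv_getD_shift P c _ (by positivity)
          rw [hPlen]; push_cast; omega
        rw [List.map_cons, List.foldl_cons, pv_foldl_add, hlast]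
        simp only [Prod.mk.injEq]
        constructor
        · ring
        · ring
      | some j =>
        simp only [Option.map_some]
        have hjmem := pv_findCut_mem _ _ _ _ hfc
        obtain ⟨hj0, hjn⟩ := (PySem.List.mem_pyRange_one).mp hjmem
        obtain ⟨jn, rfl⟩ := Int.eq_ofNat_of_zero_le hj0
        have hjn' : jn < t.length := by exact_mod_cast hjn
        have hslice : PySem.List.slice ((v :: t).map (fun x => PySem.Int.floordiv x 10)) none (some ((jn : Int) + 1))
            = PySem.Int.floordiv v 10 :: PySem.List.slice (t.map (fun x => PySem.Int.floordiv x 10)) none (some (jn : Int)) := by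
          rw [show ((jn : Int) + 1) = ((jn + 1 : Nat) : Int) by push_cast; ring,
            PySem.List.slice_to_natCast, PySem.List.slice_to_natCast]
          simp [List.take_succ_cons]
        have hgd : PySem.List.pyGetD (0 :: P.map (c + ·)) ((jn : Int) + 1) 0
            = c + PySem.List.pyGetD P (jn : Int) 0 := by
          apply pv_getD_shift
          · positivity
          · rw [hPlen]; push_cast; omega
        rw [hslice, hgd, List.foldl_cons, pv_foldl_add]
        simp only [Prod.mk.injEq, and_true]
        ring

-- ===== VERDICT (by name: the statement is the Claim_ definition above) =====
theorem solution_spec : Claim_equal_solution := by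
  intro m cakes _hdom
  unfold Spec_solution
  have hten : ∀ v ∈ PySem.List.sorted (cakes.filter (fun x => PySem.Int.mod x 10 == 0)) (fun x => x) false,
      (PySem.Int.mod v 10 == 0) = true := by
    intro v hv
    have := (PySem.List.mem_sorted _ _ _ v).mp hv
    exact (List.mem_filter.mp this).2
  have hoth : ∀ v ∈ PySem.List.sorted (cakes.filter (fun x => PySem.Int.mod x 10 != 0)) (fun x => x) false,
      (PySem.Int.mod v 10 == 0) = false := by
    intro v hv
    have := (PySem.List.mem_sorted _ _ _ v).mp hv
    have hp := (List.mem_filter.mp this).2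
    simpa [bne] using hp
  rw [solution, solution_alt, pv_loopA1_eq_pvSP _ m 0 hten,
    pv_pvPhase_eq_pvSP, pv_pvPhase_eq_pvSP,
    pv_loopA2_eq_pvSP _ _ _ hoth]
  ring
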